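-- pv_equiv track=rewrite | github.com/Daeell/AlGORITM-STUDY | programmers/17679/daeell.py | solution
-- ===== SOURCE A (Python) =====
-- def solution(m, n, board):
--     # 판 정보를 2차원 리스트 형태로 변환
--     board = [list(row) for row in board]
--     count = 0
--     while True:
--         removed = set()
--         # board를 순회한다. (반복)
--         for i in range(m-1):
--             for j in range(n-1):
--                 # 순회하면서 4개의 리스트가 모두 겹치는 것이 있으면 제거 목록에 넣는다.
--                 if board[i][j] != '-' and board[i][j] == board[i + 1][j] == board[i][j + 1] == board[i + 1][j + 1]:
--                     removed.add((i, j))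
--                     removed.add((i+1, j))
--                     removed.add((i, j+1))
--                     removed.add((i+1, j+1))
--
--         # 제거 목록에 아무 것도 없으면 break
--         if not removed:
--             break
--
--         # 제거 목록에 있으면 그것들을 다 -로 바꿈
--         for i, j in removed:
--             board[i][j] = "-"
--
--         for j in range(n):
--             for i in range(m-1, 0, -1):
--                 if board[i][j] == "-":
--                     # 블록을 계속 내려줌
--                     k = i - 1
--                     while k >= 0 and board[k][j] == "-":
--                         k -= 1
--                     if k < 0:
--                         break
--                     board[i][j] = board[k][j]
--                     board[k][j] = "-"
--
--     # 제거가 모두 끝난 이후니까 제거된 블록을 싹 세어줌.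
--     for i in range(m):
--         for j in range(n):
--             if board[i][j] == "-":
--                 count += 1
--
--     return count
-- ===== SOURCE B (Python) =====
-- def solution(m, n, board):
--     # Column-major re-implementation: keep the board as a list of columns;
--     # gravity becomes "gather survivors, pad with dashes on top" per column
--     # instead of A's per-cell upward slide, and the removed total is the
--     # number of dashes summed column by column at the end.
--     if m <= 0 or n <= 0:
--         return 0
--     cols = [[board[i][j] for i in range(m)] for j in range(n)]
--     while True:
--         rem = set()
--         for j in range(n - 1):
--             for i in range(m - 1):
--                 c = cols[j][i]
--                 if c != '-' and c == cols[j][i + 1] == cols[j + 1][i] == cols[j + 1][i + 1]: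
--                     rem.update({(i, j), (i + 1, j), (i, j + 1), (i + 1, j + 1)})
--         if not rem:
--             break
--         for i, j in rem:
--             cols[j][i] = '-'
--         cols = [['-'] * (m - len(s)) + s
--                 for s in ([c for c in col if c != '-'] for col in cols)]
--     return sum(col.count('-') for col in cols)
-- ===== Notes on version B (the rewrite author's own statement) =====
-- stated objective: alternative
-- what changed: B keeps the board as a list of columns: gravity becomes a per-column gather-survivors-then-pad rebuild instead of A's per-cell upward slide with an inner while, the 2x2 scan runs column-major, and the removed total is summed per column at the end.
import Mathlib
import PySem

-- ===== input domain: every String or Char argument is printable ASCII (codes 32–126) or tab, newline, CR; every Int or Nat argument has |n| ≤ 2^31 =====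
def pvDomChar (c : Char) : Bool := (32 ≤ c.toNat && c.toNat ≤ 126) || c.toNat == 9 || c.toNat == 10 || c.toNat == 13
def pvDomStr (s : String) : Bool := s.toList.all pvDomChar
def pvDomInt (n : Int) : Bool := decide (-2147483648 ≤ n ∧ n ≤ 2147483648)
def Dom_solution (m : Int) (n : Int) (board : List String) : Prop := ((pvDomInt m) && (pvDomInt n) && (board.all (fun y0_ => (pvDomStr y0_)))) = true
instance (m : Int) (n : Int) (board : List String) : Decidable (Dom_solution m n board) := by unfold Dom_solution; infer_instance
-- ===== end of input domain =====

-- B re-implements the 2x2 elimination game column-major: gravity is a per-column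
-- gather-then-pad rebuild instead of A's per-cell upward slide, and the removed
-- total is summed per column; equivalence is proved on boards covering the m×n window.


-- ===== PORT A =====
-- board[i][j] read / write; loop indices are nonnegative, and within Pre_ every
-- access A performs is in range, so the '-'-defaulted total forms are exact there.
def gridGet (g : List (List Char)) (i j : Nat) : Char := (g.getD i []).getD j '-'

def gridSet (g : List (List Char)) (i j : Nat) (c : Char) : List (List Char) :=
  g.set i ((g.getD i []).set j c)

-- the chained comparison board[i][j] != '-' and board[i][j] == board[i+1][j] == board[i][j+1] == board[i+1][j+1]
def detCondA (g : List (List Char)) (i j : Nat) : Bool :=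
  gridGet g i j != '-' && gridGet g i j == gridGet g (i+1) j &&
    gridGet g (i+1) j == gridGet g i (j+1) && gridGet g i (j+1) == gridGet g (i+1) (j+1)

def removedA (M N : Nat) (g : List (List Char)) : PySem.Set (Nat × Nat) :=
  (List.range (M-1)).foldl (fun s i =>
    (List.range (N-1)).foldl (fun s j =>
      if detCondA g i j then
        PySem.Set.add (PySem.Set.add (PySem.Set.add (PySem.Set.add s (i, j)) (i+1, j)) (i, j+1)) (i+1, j+1)
      else s) s) PySem.Set.empty

-- for i, j in removed: board[i][j] = "-"   (order-independent: every cell becomes '-')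
def markA (g : List (List Char)) (r : List (Nat × Nat)) : List (List Char) :=
  r.foldl (fun g p => gridSet g p.1 p.2 '-') g

-- k = i - 1; while k >= 0 and board[k][j] == "-": k -= 1   (none = k reached -1)
def findKA (g : List (List Char)) (j : Nat) : Nat → Option Nat
  | 0 => if gridGet g 0 j == '-' then none else some 0
  | k+1 => if gridGet g (k+1) j == '-' then findKA g j k else some (k+1)

-- for i in range(m-1, 0, -1): … (argument = current i; break on k < 0)
def slideColA (g : List (List Char)) (j : Nat) : Nat → List (List Char)
  | 0 => g
  | i+1 =>
    if gridGet g (i+1) j == '-' then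
      match findKA g j i with
      | none => g
      | some k => slideColA (gridSet (gridSet g (i+1) j (gridGet g k j)) k j '-') j i
    else slideColA g j i

def gravityA (M N : Nat) (g : List (List Char)) : List (List Char) :=
  (List.range N).foldl (fun g j => slideColA g j (M-1)) g

-- while True: … (fuel M*N+1 is enough: every non-breaking round erases ≥ 4 blocks)
def loopA (M N : Nat) : Nat → List (List Char) → List (List Char)
  | 0, g => g
  | f+1, g =>
    let r := removedA M N g
    if r.isEmpty then g else loopA M N f (gravityA M N (markA g r))

def countA (M N : Nat) (g : List (List Char)) : Int :=
  (List.range M).foldl (fun c i =>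
    (List.range N).foldl (fun c j => if gridGet g i j == '-' then c + 1 else c) c) 0

def solution (m : Int) (n : Int) (board : List String) : Int :=
  countA m.toNat n.toNat
    (loopA m.toNat n.toNat (m.toNat * n.toNat + 1) (board.map String.toList))

-- ===== PORT B =====
-- cols[j][i] read / write on the column-major board
def colGet (c : List (List Char)) (j i : Nat) : Char := (c.getD j []).getD i '-'

def colSet (c : List (List Char)) (j i : Nat) (ch : Char) : List (List Char) :=
  c.set j ((c.getD j []).set i ch)

def detCondB (c : List (List Char)) (j i : Nat) : Bool :=
  colGet c j i != '-' && colGet c j i == colGet c j (i+1) &&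
    colGet c j (i+1) == colGet c (j+1) i && colGet c (j+1) i == colGet c (j+1) (i+1)

def removedB (M N : Nat) (c : List (List Char)) : PySem.Set (Nat × Nat) :=
  (List.range (N-1)).foldl (fun s j =>
    (List.range (M-1)).foldl (fun s i =>
      if detCondB c j i then
        PySem.Set.update s [(i, j), (i+1, j), (i, j+1), (i+1, j+1)]
      else s) s) PySem.Set.empty

def markB (c : List (List Char)) (r : List (Nat × Nat)) : List (List Char) :=
  r.foldl (fun c p => colSet c p.2 p.1 '-') c

-- ['-'] * (m - len(s)) + s  for the survivor list s of one column
def compactB (M : Nat) (col : List Char) : List Char :=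
  List.replicate (M - (col.filter (fun ch => ch != '-')).length) '-' ++
    col.filter (fun ch => ch != '-')

def gravityB (M : Nat) (c : List (List Char)) : List (List Char) :=
  c.map (compactB M)

def loopB (M N : Nat) : Nat → List (List Char) → List (List Char)
  | 0, c => c
  | f+1, c =>
    let r := removedB M N c
    if r.isEmpty then c else loopB M N f (gravityB M (markB c r))

def solution_alt (m : Int) (n : Int) (board : List String) : Int :=
  if m ≤ 0 ∨ n ≤ 0 then 0
  else
    let c0 := (List.range n.toNat).map (fun j =>
      (List.range m.toNat).map (fun i => ((board.getD i "").toList).getD j '-'))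
    let c := loopB m.toNat n.toNat (m.toNat * n.toNat + 1) c0
    c.foldl (fun acc col => acc + (col.count '-' : Int)) 0

-- ===== PRECONDITION & SPEC =====
-- Pre_ excludes exactly the inputs on which A raises IndexError: when both m,n ≥ 1,
-- the first m rows of the board must exist and each cover n characters.
def Pre_solution (m : Int) (n : Int) (board : List String) : Prop :=
  1 ≤ m → 1 ≤ n →
    (m.toNat ≤ board.length ∧ ∀ i < m.toNat, n.toNat ≤ (board.getD i "").toList.length)

instance (m : Int) (n : Int) (board : List String) : Decidable (Pre_solution m n board) := by
  unfold Pre_solution; infer_instance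

def pvWitness_solution : Int × Int × List String := (2, 3, ["AAB", "AAB"])

def Spec_solution (m : Int) (n : Int) (board : List String) (out : Int) : Prop := out = solution_alt m n board
instance (m : Int) (n : Int) (board : List String) (out : Int) : Decidable (Spec_solution m n board out) := by unfold Spec_solution; infer_instance

-- ===== CLAIM (what is proved, stated in full; the proofs are below) =====
def Claim_equal_solution : Prop := ∀ (m : Int) (n : Int) (board : List String), Dom_solution m n board → Pre_solution m n board → Spec_solution m n board (solution m n board)

-- ===== LEMMAS AND PROOFS =====

-- the m×n window is covered by the board
def Shape (M N : Nat) (g : List (List Char)) : Prop :=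
  M ≤ g.length ∧ ∀ a < M, N ≤ (g.getD a []).length

-- column j of the m×n window, read through A's defaulted accessor
def colOf (M : Nat) (g : List (List Char)) (j : Nat) : List Char :=
  (List.range M).map (fun i => gridGet g i j)

def colsOf (M N : Nat) (g : List (List Char)) : List (List Char) :=
  (List.range N).map (colOf M g)

theorem getD_colOf (M : Nat) (g : List (List Char)) (j i : Nat) (h : i < M) :
    (colOf M g j).getD i '-' = gridGet g i j := by
  rw [List.getD_eq_getElem?_getD]
  simp [colOf, h]

theorem length_colOf (M : Nat) (g : List (List Char)) (j : Nat) :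
    (colOf M g j).length = M := by simp [colOf]

theorem colGet_colsOf (M N : Nat) (g : List (List Char)) (j i : Nat)
    (hj : j < N) (hi : i < M) : colGet (colsOf M N g) j i = gridGet g i j := by
  have h1 : (colsOf M N g).getD j [] = colOf M g j := by
    rw [List.getD_eq_getElem?_getD]; simp [colsOf, hj]
  rw [colGet, h1, getD_colOf M g j i hi]

theorem getD_set' {A : Type} (l : List A) (i p : Nat) (c d : A) :
    (l.set i c).getD p d = if p = i ∧ i < l.length then c else l.getD p d := by
  rw [List.getD_eq_getElem?_getD, List.getD_eq_getElem?_getD, List.getElem?_set]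
  rcases Decidable.em (i = p) with h | h
  · subst h
    rcases Decidable.em (i < l.length) with hl | hl
    · simp [hl]
    · simp [hl]
  · have h2 : ¬ (p = i) := fun hh => h hh.symm
    simp [h, h2]

theorem gridGet_gridSet_dash (g : List (List Char)) (i j a b : Nat) :
    gridGet (gridSet g i j '-') a b = if a = i ∧ b = j then '-' else gridGet g a b := by
  unfold gridGet gridSet
  rw [getD_set']
  by_cases hc : a = i ∧ i < g.length
  · obtain ⟨ha, hl⟩ := hc; subst ha
    rw [if_pos ⟨rfl, hl⟩, getD_set']
    split_ifs with h1 h2 h3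
    · rfl
    · exact absurd ⟨rfl, h1.1⟩ h2
    · exact List.getD_eq_default _ _ (by rcases h3 with ⟨-, hbj⟩; subst hbj; by_contra hlt; exact h1 ⟨rfl, by omega⟩)
    · rfl
  · rw [if_neg hc]
    by_cases hif : a = i ∧ b = j
    · rw [if_pos hif]
      have hrow : g.getD a [] = [] := by
        apply List.getD_eq_default
        omega
      rw [hrow]
      rfl
    · rw [if_neg hif]

theorem gridGet_gridSet (g : List (List Char)) (i j a b : Nat) (c : Char)
    (hi : i < g.length) (hj : j < (g.getD i []).length) :
    gridGet (gridSet g i j c) a b = if a = i ∧ b = j then c else gridGet g a b := by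
  unfold gridGet gridSet
  rw [getD_set']
  by_cases ha : a = i
  · subst ha
    rw [if_pos ⟨rfl, hi⟩, getD_set']
    split_ifs with h1 h2 h3
    · rfl
    · exact absurd ⟨rfl, h1.1⟩ h2
    · exact absurd ⟨h3.2, h3.2 ▸ hj⟩ h1
    · rfl
  · rw [if_neg (by tauto), if_neg (by tauto)]

theorem length_gridSet (g : List (List Char)) (i j : Nat) (c : Char) :
    (gridSet g i j c).length = g.length := by simp [gridSet]

theorem rowlen_gridSet (g : List (List Char)) (i j a : Nat) (c : Char) :
    ((gridSet g i j c).getD a []).length = (g.getD a []).length := by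
  unfold gridSet
  rw [getD_set']
  by_cases ha : a = i
  · subst ha
    by_cases hl : a < g.length <;> simp [hl]
  · simp [ha]

theorem shape_gridSet (M N : Nat) (g : List (List Char)) (i j : Nat) (c : Char)
    (h : Shape M N g) : Shape M N (gridSet g i j c) := by
  refine ⟨by rw [length_gridSet]; exact h.1, fun a ha => ?_⟩
  rw [rowlen_gridSet]; exact h.2 a ha

-- the cells a detected 2x2 block contributes
def fourCells (i j : Nat) (p : Nat × Nat) : Prop :=
  p = (i, j) ∨ p = (i+1, j) ∨ p = (i, j+1) ∨ p = (i+1, j+1)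

-- cells removed in one round, as a predicate
def Det (M N : Nat) (g : List (List Char)) (p : Nat × Nat) : Prop :=
  ∃ i j, i < M - 1 ∧ j < N - 1 ∧ detCondA g i j = true ∧ fourCells i j p

theorem mem_foldl_step {γ : Type} (p : Nat × Nat) (l : List γ)
    (st : PySem.Set (Nat × Nat) → γ → PySem.Set (Nat × Nat)) (Q : γ → Prop)
    (h : ∀ s x, x ∈ l → (p ∈ st s x ↔ p ∈ s ∨ Q x)) :
    ∀ s, p ∈ l.foldl st s ↔ p ∈ s ∨ ∃ x ∈ l, Q x := by
  induction l with
  | nil => simp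
  | cons a t ih =>
    intro s
    rw [List.foldl_cons, ih (fun s x hx => h s x (List.mem_cons_of_mem a hx)),
      h s a (List.mem_cons_self ..)]
    simp only [List.mem_cons]
    constructor
    · rintro ((hs | hq) | ⟨x, hx, hqx⟩)
      · exact Or.inl hs
      · exact Or.inr ⟨a, Or.inl rfl, hq⟩
      · exact Or.inr ⟨x, Or.inr hx, hqx⟩
    · rintro (hs | ⟨x, (rfl | hx), hqx⟩)
      · exact Or.inl (Or.inl hs)
      · exact Or.inl (Or.inr hqx)
      · exact Or.inr ⟨x, hx, hqx⟩

theorem mem_removedA (M N : Nat) (g : List (List Char)) (p : Nat × Nat) :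
    p ∈ removedA M N g ↔ Det M N g p := by
  unfold removedA
  rw [mem_foldl_step p _ _
    (fun i => ∃ j, j < N - 1 ∧ detCondA g i j = true ∧ fourCells i j p) ?_]
  · simp only [List.mem_range, Det]
    constructor
    · rintro (h | ⟨i, hi, j, hj, hc, hf⟩)
      · simp [PySem.Set.empty] at h
      · exact ⟨i, j, hi, hj, hc, hf⟩
    · rintro ⟨i, j, hi, hj, hc, hf⟩
      exact Or.inr ⟨i, hi, j, hj, hc, hf⟩
  · intro s i _
    rw [mem_foldl_step p _ _ (fun j => detCondA g i j = true ∧ fourCells i j p) ?_]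
    · simp only [List.mem_range]
    · intro s' j _
      by_cases hc : detCondA g i j = true
      · rw [if_pos hc]
        simp [PySem.Set.mem_add, fourCells, hc]
        tauto
      · simp [hc]

theorem detCondB_eq (M N : Nat) (g : List (List Char)) (i j : Nat)
    (hi : i + 1 < M) (hj : j + 1 < N) :
    detCondB (colsOf M N g) j i = detCondA g i j := by
  unfold detCondB detCondA
  rw [colGet_colsOf M N g j i (by omega) (by omega),
    colGet_colsOf M N g j (i+1) (by omega) (by omega),
    colGet_colsOf M N g (j+1) i (by omega) (by omega),
    colGet_colsOf M N g (j+1) (i+1) (by omega) (by omega)]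

theorem mem_removedB (M N : Nat) (g : List (List Char)) (p : Nat × Nat) :
    p ∈ removedB M N (colsOf M N g) ↔ Det M N g p := by
  unfold removedB
  rw [mem_foldl_step p _ _
    (fun j => ∃ i, i < M - 1 ∧ detCondA g i j = true ∧ fourCells i j p) ?_]
  · simp only [List.mem_range, Det]
    constructor
    · rintro (h | ⟨j, hj, i, hi, hc, hf⟩)
      · simp [PySem.Set.empty] at h
      · exact ⟨i, j, hi, hj, hc, hf⟩
    · rintro ⟨i, j, hi, hj, hc, hf⟩
      exact Or.inr ⟨j, hj, i, hi, hc, hf⟩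
  · intro s j hj
    rw [mem_foldl_step p _ _ (fun i => detCondA g i j = true ∧ fourCells i j p) ?_]
    · simp only [List.mem_range]
    · intro s' i hi
      simp only [List.mem_range] at hi hj
      rw [detCondB_eq M N g i j (by omega) (by omega)]
      by_cases hc : detCondA g i j = true
      · rw [if_pos hc]
        rw [PySem.Set.mem_update]
        simp [fourCells, hc]
      · simp [hc]

-- pure-list versions of A's inner while (findKA) and column loop (slideColA)
def findKC (col : List Char) : Nat → Option Nat
  | 0 => if col.getD 0 '-' == '-' then none else some 0
  | k+1 => if col.getD (k+1) '-' == '-' then findKC col k else some (k+1)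

def slideC (col : List Char) : Nat → List Char
  | 0 => col
  | i+1 =>
    if col.getD (i+1) '-' == '-' then
      match findKC col i with
      | none => col
      | some k => slideC ((col.set (i+1) (col.getD k '-')).set k '-') i
    else slideC col i

theorem findKA_eq (M : Nat) (g : List (List Char)) (j : Nat) :
    ∀ k, k < M → findKA g j k = findKC (colOf M g j) k := by
  intro k
  induction k with
  | zero => intro h; rw [findKA, findKC, getD_colOf M g j 0 h]
  | succ k ih =>
    intro h
    rw [findKA, findKC, getD_colOf M g j (k+1) h, ih (by omega)]

theorem findKC_le (col : List Char) :
    ∀ k k', findKC col k = some k' → k' ≤ k := by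
  intro k
  induction k with
  | zero =>
    intro k' h
    rw [findKC] at h
    split_ifs at h with hc
    simp at h; omega
  | succ k ih =>
    intro k' h
    rw [findKC] at h
    split_ifs at h with hc
    · exact le_trans (ih k' h) (by omega)
    · simp at h; omega

theorem findKC_none (col : List Char) :
    ∀ k, findKC col k = none → ∀ a, a ≤ k → col.getD a '-' = '-' := by
  intro k
  induction k with
  | zero =>
    intro h a ha
    rw [findKC] at h
    split_ifs at h with hc
    have : a = 0 := by omega
    subst this; exact of_decide_eq_true hc
  | succ k ih =>
    intro h a ha
    rw [findKC] at h
    split_ifs at h with hc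
    rcases Nat.lt_or_ge a (k+1) with h2 | h2
    · exact ih h a (by omega)
    · have : a = k+1 := by omega
      subst this; exact of_decide_eq_true hc

theorem findKC_some_ne (col : List Char) :
    ∀ k k', findKC col k = some k' → col.getD k' '-' ≠ '-' := by
  intro k
  induction k with
  | zero =>
    intro k' h
    rw [findKC] at h
    split_ifs at h with hc
    simp at h; subst h; simpa using hc
  | succ k ih =>
    intro k' h
    rw [findKC] at h
    split_ifs at h with hc
    · exact ih k' h
    · simp at h; subst h; simpa using hc

theorem findKC_some_mid (col : List Char) :
    ∀ k k', findKC col k = some k' → ∀ a, k' < a → a ≤ k → col.getD a '-' = '-' := by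
  intro k
  induction k with
  | zero =>
    intro k' h a h1 h2
    rw [findKC] at h
    split_ifs at h with hc
    simp at h; omega
  | succ k ih =>
    intro k' h a h1 h2
    rw [findKC] at h
    split_ifs at h with hc
    · rcases Nat.lt_or_ge a (k+1) with h3 | h3
      · exact ih k' h a h1 (by omega)
      · have : a = k+1 := by omega
        subst this; exact of_decide_eq_true hc
    · simp at h; omega

theorem colOf_gridSet_self (M N : Nat) (g : List (List Char)) (i j : Nat) (c : Char)
    (hs : Shape M N g) (hi : i < M) (hj : j < N) :
    colOf M (gridSet g i j c) j = (colOf M g j).set i c := by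
  apply List.ext_getElem
  · simp [colOf]
  · intro a h1 h2
    simp only [colOf, List.getElem_map, List.getElem_range]
    have ha : a < M := by simpa [colOf] using h1
    rw [gridGet_gridSet g i j a j c (by have := hs.1; omega) (by have := hs.2 i hi; omega),
      List.getElem_set]
    simp only [length_colOf] at *
    by_cases hai : a = i
    · subst hai; simp
    · have h2 : ¬ (a = i ∧ j = j) := fun hh => hai hh.1
      have h3 : ¬ (i = a) := fun hh => hai hh.symm
      simp [hai, h3]

theorem colOf_gridSet_ne (M N : Nat) (g : List (List Char)) (i j j' : Nat) (c : Char)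
    (hs : Shape M N g) (hi : i < M) (hj : j < N) (hne : j' ≠ j) :
    colOf M (gridSet g i j c) j' = colOf M g j' := by
  apply List.ext_getElem
  · simp [colOf]
  · intro a h1 h2
    simp only [colOf, List.getElem_map, List.getElem_range]
    rw [gridGet_gridSet g i j a j' c (by have := hs.1; omega) (by have := hs.2 i hi; omega)]
    simp [hne]

-- one column loop of A, seen on the extracted column
theorem slideColA_spec (M N : Nat) (j : Nat) (hj : j < N) :
    ∀ (i : Nat) (g : List (List Char)), Shape M N g → i < M →
      Shape M N (slideColA g j i) ∧
      colOf M (slideColA g j i) j = slideC (colOf M g j) i ∧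
      ∀ j', j' ≠ j → colOf M (slideColA g j i) j' = colOf M g j' := by
  intro i
  induction i with
  | zero => intro g hs _; exact ⟨hs, rfl, fun _ _ => rfl⟩
  | succ i ih =>
    intro g hs hi
    rw [slideColA, slideC, getD_colOf M g j (i+1) hi]
    by_cases hd : (gridGet g (i+1) j == '-') = true
    · rw [if_pos hd, if_pos hd, ← findKA_eq M g j i (by omega)]
      cases hfk : findKA g j i with
      | none => exact ⟨hs, rfl, fun _ _ => rfl⟩
      | some k =>
        have hk : k ≤ i := by
          rw [findKA_eq M g j i (by omega)] at hfk
          exact findKC_le _ i k hfk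
        have hs1 : Shape M N (gridSet g (i+1) j (gridGet g k j)) :=
          shape_gridSet M N g (i+1) j _ hs
        have hs2 : Shape M N (gridSet (gridSet g (i+1) j (gridGet g k j)) k j '-') :=
          shape_gridSet M N _ k j _ hs1
        obtain ⟨ha, hb, hc⟩ := ih _ hs2 (by omega)
        refine ⟨ha, ?_, ?_⟩
        · rw [hb]
          congr 1
          rw [colOf_gridSet_self M N _ k j '-' hs1 (by omega) hj,
            colOf_gridSet_self M N g (i+1) j _ hs (by omega) hj,
            getD_colOf M g j k (by omega)]
        · intro j' hne
          rw [hc j' hne, colOf_gridSet_ne M N _ k j j' '-' hs1 (by omega) hj hne,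
            colOf_gridSet_ne M N g (i+1) j j' _ hs (by omega) hj hne]
    · rw [if_neg hd, if_neg hd]
      exact ih g hs (by omega)

theorem getDc (col : List Char) (a : Nat) (h : a < col.length) :
    col.getD a '-' = col[a] := List.getD_eq_getElem col '-' h

-- moving the nearest survivor down over a run of dashes keeps the survivor list
theorem filter_slide_step (col : List Char) (k i : Nat) (hk : k ≤ i) (hi : i + 1 < col.length)
    (hv : col.getD k '-' ≠ '-')
    (hmid : ∀ a, k < a → a ≤ i → col.getD a '-' = '-')
    (hq : col.getD (i+1) '-' = '-') :
    ((col.set (i+1) (col.getD k '-')).set k '-').filter (fun ch => ch != '-')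
      = col.filter (fun ch => ch != '-') := by
  have hklen : k < col.length := by omega
  set v := col.getD k '-' with hvdef
  set T := col.take k with hT
  set Mdl := (col.drop (k+1)).take (i-k) with hM
  set R := col.drop (i+2) with hR
  have hTlen : T.length = k := by rw [hT, List.length_take]; omega
  have hMlen : Mdl.length = i - k := by
    rw [hM, List.length_take, List.length_drop]; omega
  have hMdash : ∀ x ∈ Mdl, x = '-' := by
    intro x hx
    rw [List.mem_iff_getElem] at hx
    obtain ⟨a, ha, hxa⟩ := hx
    simp only [hM, List.getElem_take, List.getElem_drop] at hxa
    rw [hMlen] at ha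
    have := hmid (k+1+a) (by omega) (by omega)
    rw [getDc col (k+1+a) (by omega)] at this
    rw [← hxa, this]
  have step1 : col = T ++ v :: (Mdl ++ '-' :: R) := by
    have d1 : col.drop k = v :: col.drop (k+1) := by
      rw [hvdef, getDc col k hklen]
      exact (List.getElem_cons_drop hklen).symm
    have d2 : col.drop (k+1) = Mdl ++ col.drop (i+1) := by
      rw [hM]
      conv_lhs => rw [← List.take_append_drop (i-k) (col.drop (k+1))]
      rw [List.drop_drop]
      congr 2
      omega
    have d3 : col.drop (i+1) = '-' :: R := by
      have hcell : col[i+1]'(by omega) = '-' := by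
        rw [← getDc col (i+1) (by omega)]; exact hq
      rw [hR, ← hcell]
      exact (List.getElem_cons_drop (by omega)).symm
    conv_lhs => rw [← List.take_append_drop k col, d1, d2, d3]
  have inner1 : (Mdl ++ '-' :: R).set (i-k) v = Mdl ++ v :: R := by
    rw [List.set_append, if_neg (by omega)]
    have e2 : i - k - Mdl.length = 0 := by omega
    rw [e2, List.set_cons_zero]
  have step2 : (col.set (i+1) v).set k '-' = T ++ '-' :: (Mdl ++ v :: R) := by
    conv_lhs => rw [step1]
    rw [List.set_append, if_neg (by omega)]
    have e1 : i + 1 - T.length = (i - k) + 1 := by omega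
    rw [e1, List.set_cons_succ, inner1]
    rw [List.set_append, if_neg (by omega)]
    have e3 : k - T.length = 0 := by omega
    rw [e3, List.set_cons_zero]
  rw [step2]
  conv_rhs => rw [step1]
  have hvb : (v != '-') = true := by simpa using hv
  have hMf : Mdl.filter (fun ch => ch != '-') = [] := by
    rw [List.filter_eq_nil_iff]
    intro x hx
    simp [hMdash x hx]
  simp [List.filter_append, hvb, hMf]

-- after the column loop the column is '-'-padding followed by its survivors
theorem slideC_compact (M : Nat) :
    ∀ (i : Nat) (col : List Char), col.length = M → i < M →
      (∀ a, i < a → a < M → col.getD a '-' ≠ '-') →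
      slideC col i = compactB M col := by
  intro i
  induction i with
  | zero =>
    intro col hlen hM hsuf
    rw [slideC]
    cases col with
    | nil => simp at hlen; omega
    | cons c t =>
      have htlen : t.length = M - 1 := by simp at hlen; omega
      have ht : ∀ x ∈ t, (x != '-') = true := by
        intro x hx
        rw [List.mem_iff_getElem] at hx
        obtain ⟨a, ha, hxa⟩ := hx
        have := hsuf (a+1) (by omega) (by omega)
        rw [getDc _ (a+1) (by simp; omega)] at this
        simp only [List.getElem_cons_succ] at this
        rw [hxa] at this
        simpa using this
      have htf : t.filter (fun ch => ch != '-') = t := List.filter_eq_self.2 ht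
      by_cases hc : c = '-'
      · subst hc
        have hf : ('-' :: t).filter (fun ch => ch != '-') = t := by
          simp [htf]
        rw [compactB, hf, htlen, show M - (M-1) = 1 by omega]
        rfl
      · have hcb : (c != '-') = true := by simpa using hc
        have hf : (c :: t).filter (fun ch => ch != '-') = c :: t := by
          rw [List.filter_cons, if_pos hcb, htf]
        rw [compactB, hf, show M - (c :: t).length = 0 by simp [htlen]; omega]
        rfl
  | succ i ih =>
    intro col hlen hM hsuf
    rw [slideC]
    by_cases hd : (col.getD (i+1) '-' == '-') = true
    · rw [if_pos hd]
      have hq : col.getD (i+1) '-' = '-' := by simpa using hd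
      cases hfk : findKC col i with
      | none =>
        show col = compactB M col
        have hdash : ∀ a, a ≤ i → col.getD a '-' = '-' := findKC_none col i hfk
        have htake : col.take (i+2) = List.replicate (i+2) '-' := by
          rw [List.eq_replicate_iff]
          constructor
          · rw [List.length_take]; omega
          · intro x hx
            rw [List.mem_iff_getElem] at hx
            obtain ⟨a, ha, hxa⟩ := hx
            rw [List.getElem_take] at hxa
            rw [List.length_take] at ha
            rcases Nat.lt_or_ge a (i+1) with h3 | h3
            · have := hdash a (by omega)
              rw [getDc col a (by omega)] at this
              rw [← hxa, this]
            · have : a = i+1 := by omega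
              subst this
              rw [← hxa, ← getDc col (i+1) (by omega), hq]
        have hdropf : (col.drop (i+2)).filter (fun ch => ch != '-') = col.drop (i+2) := by
          apply List.filter_eq_self.2
          intro x hx
          rw [List.mem_iff_getElem] at hx
          obtain ⟨a, ha, hxa⟩ := hx
          rw [List.getElem_drop] at hxa
          have := hsuf (i+2+a) (by omega) (by rw [List.length_drop] at ha; omega)
          rw [getDc col (i+2+a) (by rw [List.length_drop] at ha; omega)] at this
          rw [hxa] at this
          simpa using this
        have hcolf : col.filter (fun ch => ch != '-') = col.drop (i+2) := by
          conv_lhs => rw [← List.take_append_drop (i+2) col]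
          rw [List.filter_append, hdropf, htake]
          have hrf : (List.replicate (i+2) '-').filter (fun ch => ch != '-') = [] := by
            rw [List.filter_eq_nil_iff]
            intro x hx
            simp [List.eq_of_mem_replicate hx]
          rw [hrf, List.nil_append]
        rw [compactB, hcolf, List.length_drop, hlen,
          show M - (M - (i+2)) = i + 2 by omega, ← htake, List.take_append_drop]
      | some k =>
        show slideC ((col.set (i+1) (col.getD k '-')).set k '-') i = compactB M col
        have hk : k ≤ i := findKC_le col i k hfk
        have hv : col.getD k '-' ≠ '-' := findKC_some_ne col i k hfk
        have hmid : ∀ a, k < a → a ≤ i → col.getD a '-' = '-' :=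
          findKC_some_mid col i k hfk
        have hfil := filter_slide_step col k i hk (by omega) hv hmid hq
        have hlen' : ((col.set (i+1) (col.getD k '-')).set k '-').length = M := by
          simp [hlen]
        have hsuf' : ∀ a, i < a → a < M →
            ((col.set (i+1) (col.getD k '-')).set k '-').getD a '-' ≠ '-' := by
          intro a h1 h2
          have hne1 : ¬ (a = k ∧ k < (col.set (i+1) (col.getD k '-')).length) := by
            rintro ⟨rfl, -⟩; omega
          rw [getD_set', if_neg hne1, getD_set']
          by_cases ha : a = i+1
          · subst ha
            rw [if_pos ⟨rfl, by omega⟩]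
            exact hv
          · rw [if_neg (by tauto)]
            exact hsuf a (by omega) h2
        rw [ih _ hlen' (by omega) hsuf']
        rw [compactB, compactB, hfil]
    · rw [if_neg hd]
      apply ih col hlen (by omega)
      intro a h1 h2
      rcases Nat.lt_or_ge (i+1) a with h3 | h3
      · exact hsuf a h3 h2
      · have : a = i+1 := by omega
        subst this
        simpa using hd

theorem isEmpty_removed (M N : Nat) (g : List (List Char)) :
    (removedA M N g).isEmpty = (removedB M N (colsOf M N g)).isEmpty := by
  rw [Bool.eq_iff_iff, List.isEmpty_iff, List.isEmpty_iff,
    List.eq_nil_iff_forall_not_mem, List.eq_nil_iff_forall_not_mem]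
  constructor
  · intro h p hp
    exact h p ((mem_removedA M N g p).2 ((mem_removedB M N g p).1 hp))
  · intro h p hp
    exact h p ((mem_removedB M N g p).2 ((mem_removedA M N g p).1 hp))

theorem gridGet_markA (r : List (Nat × Nat)) :
    ∀ (g : List (List Char)) (a b : Nat),
      gridGet (markA g r) a b = if (a, b) ∈ r then '-' else gridGet g a b := by
  induction r with
  | nil => simp [markA]
  | cons q t ih =>
    intro g a b
    rw [markA, List.foldl_cons]
    rw [show (t.foldl (fun g p => gridSet g p.1 p.2 '-') (gridSet g q.1 q.2 '-'))
        = markA (gridSet g q.1 q.2 '-') t from rfl, ih]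
    rw [gridGet_gridSet_dash]
    by_cases hm : (a, b) ∈ t
    · simp [hm]
    · by_cases hq : (a, b) = q
      · have h2 : a = q.1 ∧ b = q.2 := by rw [← hq]; exact ⟨rfl, rfl⟩
        simp [h2]
      · have h2 : ¬ (a = q.1 ∧ b = q.2) := by
          rintro ⟨h1, h2⟩; exact hq (by rw [h1, h2])
        simp [hm, hq, h2]

theorem colGet_markB (r : List (Nat × Nat)) :
    ∀ (c : List (List Char)) (j i : Nat),
      colGet (markB c r) j i = if (i, j) ∈ r then '-' else colGet c j i := by
  induction r with
  | nil => simp [markB]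
  | cons q t ih =>
    intro c j i
    rw [markB, List.foldl_cons]
    rw [show (t.foldl (fun c p => colSet c p.2 p.1 '-') (colSet c q.2 q.1 '-'))
        = markB (colSet c q.2 q.1 '-') t from rfl, ih]
    rw [show colSet c q.2 q.1 '-' = gridSet c q.2 q.1 '-' from rfl,
      show ∀ X, colGet X j i = gridGet X j i from fun _ => rfl,
      show colGet c j i = gridGet c j i from rfl, gridGet_gridSet_dash]
    by_cases hm : (i, j) ∈ t
    · simp [hm]
    · by_cases hq : (i, j) = q
      · have h2 : j = q.2 ∧ i = q.1 := by rw [← hq]; exact ⟨rfl, rfl⟩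
        simp [h2]
      · have h2 : ¬ (j = q.2 ∧ i = q.1) := by
          rintro ⟨h1, h2⟩; exact hq (by rw [h1, h2])
        simp [hm, hq, h2]

theorem length_markA (r : List (Nat × Nat)) :
    ∀ g : List (List Char), (markA g r).length = g.length := by
  induction r with
  | nil => simp [markA]
  | cons q t ih =>
    intro g
    rw [markA, List.foldl_cons,
      show (t.foldl (fun g p => gridSet g p.1 p.2 '-') (gridSet g q.1 q.2 '-'))
        = markA (gridSet g q.1 q.2 '-') t from rfl, ih, length_gridSet]

theorem rowlen_markA (r : List (Nat × Nat)) :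
    ∀ (g : List (List Char)) (a : Nat),
      ((markA g r).getD a []).length = (g.getD a []).length := by
  induction r with
  | nil => simp [markA]
  | cons q t ih =>
    intro g a
    rw [markA, List.foldl_cons,
      show (t.foldl (fun g p => gridSet g p.1 p.2 '-') (gridSet g q.1 q.2 '-'))
        = markA (gridSet g q.1 q.2 '-') t from rfl, ih, rowlen_gridSet]

theorem shape_markA (M N : Nat) (g : List (List Char)) (r : List (Nat × Nat))
    (h : Shape M N g) : Shape M N (markA g r) := by
  refine ⟨by rw [length_markA]; exact h.1, fun a ha => ?_⟩
  rw [rowlen_markA]; exact h.2 a ha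


-- a list that matches colsOf pointwise is colsOf
theorem eq_colsOf_of_pointwise (M N : Nat) (X g : List (List Char))
    (hlen : X.length = N) (hrow : ∀ j, j < N → (X.getD j []).length = M)
    (hpt : ∀ j i, j < N → i < M → colGet X j i = gridGet g i j) :
    X = colsOf M N g := by
  apply List.ext_getElem (by simp [colsOf, hlen])
  intro j h1 h2
  have hjN : j < N := by omega
  have hXj : X.getD j [] = X[j] := List.getD_eq_getElem X [] h1
  apply List.ext_getElem
  · rw [← hXj, hrow j hjN]
    simp [colsOf, colOf]
  · intro i hi1 hi2
    have hiM : i < M := by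
      rw [← hXj] at hi1
      rw [hrow j hjN] at hi1
      exact hi1
    have e1 : X[j][i] = colGet X j i := by
      rw [colGet, hXj, List.getD_eq_getElem X[j] '-' hi1]
    rw [e1, hpt j i hjN hiM]
    simp [colsOf, colOf]

theorem length_markB (r : List (Nat × Nat)) :
    ∀ c : List (List Char), (markB c r).length = c.length := by
  induction r with
  | nil => simp [markB]
  | cons q t ih =>
    intro c
    rw [markB, List.foldl_cons,
      show (t.foldl (fun c p => colSet c p.2 p.1 '-') (colSet c q.2 q.1 '-'))
        = markB (colSet c q.2 q.1 '-') t from rfl, ih,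
      show colSet c q.2 q.1 '-' = gridSet c q.2 q.1 '-' from rfl, length_gridSet]

theorem rowlen_markB (r : List (Nat × Nat)) :
    ∀ (c : List (List Char)) (a : Nat),
      ((markB c r).getD a []).length = (c.getD a []).length := by
  induction r with
  | nil => simp [markB]
  | cons q t ih =>
    intro c a
    rw [markB, List.foldl_cons,
      show (t.foldl (fun c p => colSet c p.2 p.1 '-') (colSet c q.2 q.1 '-'))
        = markB (colSet c q.2 q.1 '-') t from rfl, ih,
      show colSet c q.2 q.1 '-' = gridSet c q.2 q.1 '-' from rfl, rowlen_gridSet]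

theorem length_colsOf (M N : Nat) (g : List (List Char)) :
    (colsOf M N g).length = N := by simp [colsOf]

theorem rowlen_colsOf (M N : Nat) (g : List (List Char)) (j : Nat) (hj : j < N) :
    ((colsOf M N g).getD j []).length = M := by
  rw [List.getD_eq_getElem?_getD]
  simp [colsOf, hj, colOf]

theorem mark_cols (M N : Nat) (g : List (List Char)) (rA rB : List (Nat × Nat))
    (hmem : ∀ p : Nat × Nat, p ∈ rA ↔ p ∈ rB) :
    markB (colsOf M N g) rB = colsOf M N (markA g rA) := by
  apply eq_colsOf_of_pointwise
  · rw [length_markB, length_colsOf]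
  · intro j hj
    rw [rowlen_markB, rowlen_colsOf M N g j hj]
  · intro j i hj hi
    rw [colGet_markB, colGet_colsOf M N g j i hj hi, gridGet_markA]
    by_cases hm : (i, j) ∈ rB
    · rw [if_pos hm, if_pos ((hmem (i, j)).2 hm)]
    · rw [if_neg hm, if_neg (fun h => hm ((hmem (i, j)).1 h))]

-- one top-level column slide (handles M = 0 trivially)
theorem slide_top (M N : Nat) (j : Nat) (hj : j < N) (g : List (List Char))
    (hs : Shape M N g) :
    Shape M N (slideColA g j (M-1)) ∧
    colOf M (slideColA g j (M-1)) j = slideC (colOf M g j) (M-1) ∧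
    ∀ j', j' ≠ j → colOf M (slideColA g j (M-1)) j' = colOf M g j' := by
  cases M with
  | zero => exact ⟨hs, rfl, fun _ _ => rfl⟩
  | succ M' => exact slideColA_spec (M'+1) N j hj (M'+1-1) g hs (by omega)

theorem gravity_fold (M N : Nat) (g : List (List Char)) (hs : Shape M N g) :
    ∀ K, K ≤ N →
      Shape M N ((List.range K).foldl (fun g j => slideColA g j (M-1)) g) ∧
      ∀ j, colOf M ((List.range K).foldl (fun g j => slideColA g j (M-1)) g) j
        = if j < K then slideC (colOf M g j) (M-1) else colOf M g j := by
  intro K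
  induction K with
  | zero => intro _; exact ⟨hs, fun j => by simp⟩
  | succ K ih =>
    intro hK
    obtain ⟨ha, hb⟩ := ih (by omega)
    rw [List.range_succ, List.foldl_append, List.foldl_cons, List.foldl_nil]
    obtain ⟨hc, hd, he⟩ := slide_top M N K (by omega) _ ha
    refine ⟨hc, fun j => ?_⟩
    by_cases hjK : j = K
    · subst hjK
      rw [hd, hb j, if_neg (by omega), if_pos (by omega)]
    · rw [he j hjK, hb j]
      by_cases h2 : j < K
      · rw [if_pos h2, if_pos (by omega)]
      · rw [if_neg h2, if_neg (by omega)]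

theorem shape_gravityA (M N : Nat) (g : List (List Char)) (hs : Shape M N g) :
    Shape M N (gravityA M N g) :=
  ((gravity_fold M N g hs N (le_refl N)).1)

theorem length_compactB (M : Nat) (col : List Char) (h : col.length = M) :
    (compactB M col).length = M := by
  rw [compactB]
  have : (col.filter (fun ch => ch != '-')).length ≤ M := by
    rw [← h]; exact List.length_filter_le ..
  simp
  omega

theorem gravity_cols (M N : Nat) (g : List (List Char)) (hs : Shape M N g) :
    gravityB M (colsOf M N g) = colsOf M N (gravityA M N g) := by
  apply eq_colsOf_of_pointwise
  · rw [gravityB, List.length_map, length_colsOf]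
  · intro j hj
    rw [gravityB, List.getD_eq_getElem?_getD]
    rw [List.getElem?_map]
    have : (colsOf M N g)[j]? = some (colOf M g j) := by simp [colsOf, hj]
    rw [this]
    simp only [Option.map_some, Option.getD_some]
    exact length_compactB M _ (length_colOf M g j)
  · intro j i hj hi
    have hrow : (List.map (compactB M) (colsOf M N g)).getD j []
        = compactB M (colOf M g j) := by
      rw [List.getD_eq_getElem?_getD, List.getElem?_map]
      have hsome : (colsOf M N g)[j]? = some (colOf M g j) := by simp [colsOf, hj]
      rw [hsome]
      simp only [Option.map_some, Option.getD_some]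
    have h1 : colGet (gravityB M (colsOf M N g)) j i
        = (compactB M (colOf M g j)).getD i '-' := by
      rw [colGet, gravityB, hrow]
    rw [h1, ← getD_colOf M (gravityA M N g) j i hi]
    congr 1
    rw [gravityA,
      (gravity_fold M N g hs N (le_refl N)).2 j, if_pos hj]
    cases M with
    | zero => omega
    | succ M' =>
      exact (slideC_compact (M'+1) (M'+1-1) (colOf (M'+1) g j) (length_colOf ..)
        (by omega) (fun a h1 h2 => by omega)).symm

theorem loop_eq (M N : Nat) :
    ∀ (f : Nat) (g : List (List Char)), Shape M N g →
      loopB M N f (colsOf M N g) = colsOf M N (loopA M N f g) := by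
  intro f
  induction f with
  | zero => intro g _; rfl
  | succ f ih =>
    intro g hs
    rw [loopA, loopB]
    rw [← isEmpty_removed M N g]
    by_cases he : (removedA M N g).isEmpty = true
    · rw [if_pos he, if_pos he]
    · rw [if_neg he, if_neg he]
      rw [mark_cols M N g (removedA M N g) (removedB M N (colsOf M N g))
        (fun p => (mem_removedA M N g p).trans (mem_removedB M N g p).symm)]
      rw [gravity_cols M N _ (shape_markA M N g _ hs)]
      exact ih _ (shape_gravityA M N _ (shape_markA M N g _ hs))

theorem foldl_count_int {γ : Type} (l : List γ) (P : γ → Bool) :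
    ∀ c0 : Int, l.foldl (fun c x => if P x then c + 1 else c) c0 = c0 + l.countP P := by
  induction l with
  | nil => intro c0; simp
  | cons a t ih =>
    intro c0
    rw [List.foldl_cons, ih, List.countP_cons]
    by_cases h : P a
    · simp [h]; ring
    · simp [h]

theorem foldl_add_int {γ : Type} (l : List γ) (f : γ → Int) :
    ∀ c0 : Int, l.foldl (fun c x => c + f x) c0 = c0 + (l.map f).sum := by
  induction l with
  | nil => intro c0; simp
  | cons a t ih =>
    intro c0
    rw [List.foldl_cons, ih, List.map_cons, List.sum_cons]
    ring

theorem sum_map_range_int (K : Nat) (f : Nat → Int) :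
    ((List.range K).map f).sum = ∑ t ∈ Finset.range K, f t := by
  induction K with
  | zero => simp
  | succ k ih =>
    rw [List.range_succ, Finset.sum_range_succ, List.map_append, List.sum_append, ih]
    simp

theorem countP_range_int (K : Nat) (P : Nat → Bool) :
    ((List.range K).countP P : Int) = ∑ t ∈ Finset.range K, (if P t then (1:Int) else 0) := by
  induction K with
  | zero => simp
  | succ k ih =>
    rw [List.range_succ, Finset.sum_range_succ, List.countP_append, ← ih]
    by_cases h : P k
    · simp [h]
    · simp [h]

-- row-major dash count over the window = column-major dash count of the columns
theorem count_eq (M N : Nat) (g : List (List Char)) :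
    countA M N g = (colsOf M N g).foldl (fun acc col => acc + (col.count '-' : Int)) 0 := by
  have hL : countA M N g
      = ∑ i ∈ Finset.range M, ∑ j ∈ Finset.range N,
          (if gridGet g i j == '-' then (1:Int) else 0) := by
    rw [countA]
    rw [PySem.List.foldl_congr_mem (List.range M)
      (fun c i => (List.range N).foldl (fun c j => if gridGet g i j == '-' then c + 1 else c) c)
      (fun (c : Int) (i : Nat) =>
        c + (((List.range N).countP (fun j => gridGet g i j == '-') : Nat) : Int))
      0
      (by intro acc i _
          exact foldl_count_int (List.range N) (fun j => gridGet g i j == '-') acc)]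
    rw [foldl_add_int, sum_map_range_int]
    rw [Int.zero_add]
    apply Finset.sum_congr rfl
    intro i _
    rw [countP_range_int]
  have hR : (colsOf M N g).foldl (fun acc col => acc + (col.count '-' : Int)) 0
      = ∑ j ∈ Finset.range N, ∑ i ∈ Finset.range M,
          (if gridGet g i j == '-' then (1:Int) else 0) := by
    rw [foldl_add_int, Int.zero_add, colsOf, List.map_map, sum_map_range_int]
    apply Finset.sum_congr rfl
    intro j _
    have h1 : (Function.comp (fun col : List Char => (col.count '-' : Int)) (colOf M g)) j
        = ((colOf M g j).count '-' : Int) := rfl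
    rw [h1, List.count_eq_countP, colOf, List.countP_map]
    have h2 : ((fun x => x == '-') ∘ fun i => gridGet g i j)
        = fun i => gridGet g i j == '-' := rfl
    rw [h2, countP_range_int]
  rw [hL, hR, Finset.sum_comm]

theorem row_bridge (board : List String) (i : Nat) :
    (board.map String.toList).getD i [] = (board.getD i "").toList := by
  rcases Nat.lt_or_ge i board.length with h | h
  · rw [List.getD_eq_getElem (board.map String.toList) [] (by simpa using h),
      List.getElem_map, ← List.getD_eq_getElem board "" h]
  · rw [List.getD_eq_default _ _ (by simpa using h), List.getD_eq_default _ _ h]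
    rfl

theorem init_cols (board : List String) (M N : Nat) :
    (List.range N).map (fun j =>
        (List.range M).map (fun i => ((board.getD i "").toList).getD j '-'))
      = colsOf M N (board.map String.toList) := by
  unfold colsOf colOf
  apply List.map_congr_left
  intro j _
  apply List.map_congr_left
  intro i _
  rw [gridGet, row_bridge]

theorem main_eq (M N : Nat) (board : List String)
    (hs : Shape M N (board.map String.toList)) (F : Nat) :
    countA M N (loopA M N F (board.map String.toList))
      = (loopB M N F ((List.range N).map (fun j =>
          (List.range M).map (fun i => ((board.getD i "").toList).getD j '-')))).foldl
          (fun acc col => acc + (col.count '-' : Int)) 0 := by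
  rw [init_cols board M N, loop_eq M N F _ hs, ← count_eq]

theorem countA_zeroN (M : Nat) (g : List (List Char)) : countA M 0 g = 0 := by
  rw [countA]
  have h : (fun (c : Int) (i : Nat) =>
      (List.range 0).foldl (fun c j => if gridGet g i j == '-' then c + 1 else c) c)
        = fun (c : Int) (_ : Nat) => c := by
    funext c i
    rw [List.range_zero, List.foldl_nil]
  rw [h, List.foldl_fixed]

theorem countA_zeroM (N : Nat) (g : List (List Char)) : countA 0 N g = 0 := by
  rw [countA, List.range_zero, List.foldl_nil]

-- ===== VERDICT (by name: the statement is the Claim_ definition above) =====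
theorem solution_spec : Claim_equal_solution := by
  unfold Claim_equal_solution
  intro m n board _ hpre
  unfold Spec_solution solution solution_alt
  by_cases hg : m ≤ 0 ∨ n ≤ 0
  · rw [if_pos hg]
    rcases hg with hm | hn
    · rw [show m.toNat = 0 by omega, countA_zeroM]
    · rw [show n.toNat = 0 by omega, countA_zeroN]
  · rw [if_neg hg]
    rw [not_or] at hg
    obtain ⟨hgm, hgn⟩ := hg
    obtain ⟨h1, h2⟩ := hpre (by omega) (by omega)
    refine main_eq m.toNat n.toNat board ⟨by simpa using h1, fun a ha => ?_⟩
      (m.toNat * n.toNat + 1)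
    rw [row_bridge]
    exact h2 a ha
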